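-- pv_equiv track=rewrite | github.com/ccc2223/Castle-Defense | ui/utils/resource_formatter.py | format_cost
-- ===== SOURCE A (Python) =====
-- RESOURCE_DISPLAY_ORDER = [
--     "Monster Coins",
--     "Stone",
--     "Iron",
--     "Copper",
--     "Thorium",
--     "Force Core",
--     "Spirit Core",
--     "Magic Core",
--     "Void Core",
--     "Unstoppable Force",
--     "Serene Spirit",
--     "Multitudation Vortex"
-- ]
--
-- def format_cost(resource_cost, separator=", "):
--     """
--     Format a dictionary of resource costs into a consistent string
--     Uses "Resource: Amount" format
--
--     Args:
--         resource_cost: Dictionary mapping resource type to amount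
--         separator: String to use between resource entries
--
--     Returns:
--         Formatted cost string
--     """
--     if not resource_cost:
--         return "Free"
--
--     # Sort resources according to standard order
--     sorted_resources = []
--
--     for resource in RESOURCE_DISPLAY_ORDER:
--         if resource in resource_cost:
--             sorted_resources.append(f"{resource}: {resource_cost[resource]}")
--
--     # Add any resources not in the standard order
--     for resource, amount in resource_cost.items():
--         if resource not in RESOURCE_DISPLAY_ORDER:
--             sorted_resources.append(f"{resource}: {amount}")
--
--     return separator.join(sorted_resources)
-- ===== SOURCE B (Python) =====
-- RESOURCE_DISPLAY_ORDER = [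
--     "Monster Coins",
--     "Stone",
--     "Iron",
--     "Copper",
--     "Thorium",
--     "Force Core",
--     "Spirit Core",
--     "Magic Core",
--     "Void Core",
--     "Unstoppable Force",
--     "Serene Spirit",
--     "Multitudation Vortex"
-- ]
--
-- def format_cost(resource_cost, separator=", "):
--     """Single pass over the dict into rank buckets (rank looked up in a dict),
--     then one flatten pass -- no per-item scan of the order list, no per-order
--     membership probe of the dict."""
--     if not resource_cost:
--         return "Free"
--     n = len(RESOURCE_DISPLAY_ORDER)
--     rank = {name: i for i, name in enumerate(RESOURCE_DISPLAY_ORDER)}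
--     buckets = {}
--     for name, amount in resource_cost.items():
--         buckets.setdefault(rank.get(name, n), []).append(f"{name}: {amount}")
--     parts = []
--     for i in range(n + 1):
--         parts.extend(buckets.get(i, []))
--     return separator.join(parts)
-- ===== Notes on version B (the rewrite author's own statement) =====
-- stated objective: alternative
-- what changed: A scans the 12-name order list probing the dict and then scans the dict probing the order list; B builds a name-to-rank index once, drops each dict item into its rank bucket in a single pass, and flattens the buckets.
import Mathlib
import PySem

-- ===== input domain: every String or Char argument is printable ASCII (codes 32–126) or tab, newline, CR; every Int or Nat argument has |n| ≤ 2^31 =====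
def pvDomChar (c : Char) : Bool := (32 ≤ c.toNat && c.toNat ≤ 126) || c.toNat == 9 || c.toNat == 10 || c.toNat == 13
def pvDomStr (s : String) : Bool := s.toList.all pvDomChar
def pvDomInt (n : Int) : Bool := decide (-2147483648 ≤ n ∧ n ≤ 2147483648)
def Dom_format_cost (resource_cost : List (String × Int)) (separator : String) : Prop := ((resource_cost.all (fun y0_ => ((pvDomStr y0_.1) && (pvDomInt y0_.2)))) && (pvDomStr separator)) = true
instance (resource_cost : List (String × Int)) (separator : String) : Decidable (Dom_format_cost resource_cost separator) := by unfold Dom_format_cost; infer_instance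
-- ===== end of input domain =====

-- B replaces A's two filtered scans (the order list probed against the dict, then the dict scanned
-- against the order list) by one pass over the dict into rank buckets plus a flatten; equal return values.

-- ===== PORT A =====
def pvOrder : List String :=
  ["Monster Coins", "Stone", "Iron", "Copper", "Thorium", "Force Core", "Spirit Core",
   "Magic Core", "Void Core", "Unstoppable Force", "Serene Spirit", "Multitudation Vortex"]

-- f"{name}: {amount}" (the same f-string appears in both programs)
def pvFmt (name : String) (amount : Int) : String := name ++ ": " ++ PySem.Int.toStr amount

def format_cost (resource_cost : List (String × Int)) (separator : String) : String :=
  if resource_cost = [] then "Free"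
  else
    let d := PySem.Dict.mk resource_cost
    -- for resource in RESOURCE_DISPLAY_ORDER: if resource in cost: append f"{resource}: {cost[resource]}"
    -- ('resource in resource_cost' plus the then-guaranteed lookup 'resource_cost[resource]' is one get? match)
    let sortedResources := pvOrder.foldl (fun acc resource =>
      match d.get? resource with
      | some v => acc ++ [pvFmt resource v]
      | none => acc) []
    -- for resource, amount in cost.items(): if resource not in RESOURCE_DISPLAY_ORDER: append
    let sortedResources2 := d.items.foldl (fun acc p =>
      if !(pvOrder.contains p.1) then acc ++ [pvFmt p.1 p.2] else acc) sortedResources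
    PySem.Str.join separator sortedResources2

-- ===== PORT B =====
-- rank = {name: i for i, name in enumerate(RESOURCE_DISPLAY_ORDER)}
def pvRankDict : PySem.Dict String Int :=
  PySem.Dict.ofList ((PySem.List.enumerate pvOrder).map (fun p => (p.2, p.1)))

def format_cost_alt (resource_cost : List (String × Int)) (separator : String) : String :=
  if resource_cost = [] then "Free"
  else
    let n : Int := (pvOrder.length : Int)
    -- for name, amount in cost.items(): buckets.setdefault(rank.get(name, n), []).append(f"{name}: {amount}")
    let buckets := (PySem.Dict.mk resource_cost).items.foldl
      (fun (b : PySem.Dict Int (List String)) p =>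
        b.modify (pvRankDict.getD p.1 n) [] (· ++ [pvFmt p.1 p.2]))
      PySem.Dict.empty
    -- for i in range(n + 1): parts.extend(buckets.get(i, []))
    let parts := (PySem.List.pyRange 0 (n + 1) 1).foldl
      (fun acc i => acc ++ buckets.getD i []) []
    PySem.Str.join separator parts

-- ===== PRECONDITION & SPEC =====
-- Pre_ excludes only association lists with duplicate keys: they represent no Python dict
-- (dict keys are unique), so neither program's Python ever receives such an input.
def Pre_format_cost (resource_cost : List (String × Int)) (separator : String) : Prop :=
  (resource_cost.map Prod.fst).Nodup
instance (resource_cost : List (String × Int)) (separator : String) : Decidable (Pre_format_cost resource_cost separator) := by unfold Pre_format_cost; infer_instance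

def pvWitness_format_cost : (List (String × Int)) × String := ([("Stone", 5), ("Gold Bar", 2)], ", ")

def Spec_format_cost (resource_cost : List (String × Int)) (separator : String) (out : String) : Prop := out = format_cost_alt resource_cost separator
instance (resource_cost : List (String × Int)) (separator : String) (out : String) : Decidable (Spec_format_cost resource_cost separator out) := by unfold Spec_format_cost; infer_instance

-- ===== CLAIM (what is proved, stated in full; the proofs are below) =====
def Claim_equal_format_cost : Prop := ∀ (resource_cost : List (String × Int)) (separator : String), Dom_format_cost resource_cost separator → Pre_format_cost resource_cost separator → Spec_format_cost resource_cost separator (format_cost resource_cost separator)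

-- ===== LEMMAS AND PROOFS =====

-- rank of a name: its index in pvOrder if listed, else 12 (proof-side view of pvRankDict)
def pvRank (name : String) : Int :=
  if name ∈ pvOrder then (pvOrder.idxOf name : Int) else 12

theorem pvRankDict_getD (name : String) : pvRankDict.getD name 12 = pvRank name := by
  by_cases h : name ∈ pvOrder
  · simp only [pvOrder, List.mem_cons, List.not_mem_nil, or_false] at h
    rcases h with h|h|h|h|h|h|h|h|h|h|h|h <;> subst h <;> decide
  · have h' := h
    simp only [pvOrder, List.mem_cons, List.not_mem_nil, or_false, not_or] at h'
    obtain ⟨h1,h2,h3,h4,h5,h6,h7,h8,h9,h10,h11,h12⟩ := h'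
    rw [pvRank, if_neg h]
    rw [show pvRankDict = PySem.Dict.mk [("Monster Coins",0),("Stone",1),("Iron",2),("Copper",3),("Thorium",4),("Force Core",5),("Spirit Core",6),("Magic Core",7),("Void Core",8),("Unstoppable Force",9),("Serene Spirit",10),("Multitudation Vortex",11)] from rfl]
    simp [PySem.Dict.getD_eq_get?_getD, Ne.symm h1, Ne.symm h2, Ne.symm h3, Ne.symm h4,
      Ne.symm h5, Ne.symm h6, Ne.symm h7, Ne.symm h8, Ne.symm h9, Ne.symm h10, Ne.symm h11,
      Ne.symm h12, PySem.Dict.get?]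

theorem pvRank_eq_iff (i : Nat) (hi : i < 12) (name : String) :
    pvRank name = (i : Int) ↔ name = pvOrder[i]'(by simp [pvOrder]; omega) := by
  have hlen : pvOrder.length = 12 := by decide
  have hnd : pvOrder.Nodup := by decide
  constructor
  · intro h
    rw [pvRank] at h
    split at h
    · rename_i hmem
      have hidx : pvOrder.idxOf name = i := by exact_mod_cast h
      have hlt : pvOrder.idxOf name < pvOrder.length := List.idxOf_lt_length_of_mem hmem
      calc name = pvOrder[pvOrder.idxOf name]'hlt := (List.getElem_idxOf hlt).symm
        _ = pvOrder[i]'(by omega) := by congr 1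
    · omega
  · intro h
    subst h
    have hmem : pvOrder[i]'(by omega) ∈ pvOrder := List.getElem_mem _
    rw [pvRank, if_pos hmem]
    norm_cast
    exact hnd.idxOf_getElem i (by omega)

theorem pvRank_eq_twelve (name : String) : pvRank name = 12 ↔ name ∉ pvOrder := by
  rw [pvRank]
  split
  · rename_i hmem
    have hlt : pvOrder.idxOf name < pvOrder.length := List.idxOf_lt_length_of_mem hmem
    have : pvOrder.length = 12 := by decide
    constructor
    · intro h; omega
    · intro h; exact absurd hmem h
  · simp_all

-- with unique keys, filtering the item list by a key yields exactly the dict's binding for it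
theorem pv_filter_key (rc : List (String × Int)) (hnd : (rc.map Prod.fst).Nodup) (k : String) :
    rc.filter (fun p => p.1 == k)
      = ((PySem.Dict.mk rc).get? k).elim [] (fun v => [(k, v)]) := by
  induction rc with
  | nil => simp [PySem.Dict.get?]
  | cons p t ih =>
    simp only [List.map_cons, List.nodup_cons] at hnd
    obtain ⟨hp, hnd'⟩ := hnd
    rw [List.filter_cons, PySem.Dict.get?_mk_cons]
    by_cases hk : p.1 = k
    · subst hk
      simp only [beq_self_eq_true, if_pos]
      have : t.filter (fun q => q.1 == p.1) = [] := by
        rw [List.filter_eq_nil_iff]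
        intro q hq
        simp only [beq_iff_eq]
        exact fun he => hp (he ▸ List.mem_map_of_mem hq)
      simp [this]
    · have h1 : (p.1 == k) = false := by simp [hk]
      simp only [h1, Bool.false_eq_true, if_false]
      exact ih hnd'

-- A's first loop appends the formatted binding of each present order entry
theorem pv_foldl_opt (d : PySem.Dict String Int) (l : List String) (init : List String) :
    l.foldl (fun acc resource =>
      match d.get? resource with
      | some v => acc ++ [pvFmt resource v]
      | none => acc) init
      = init ++ l.flatMap (fun r => ((d.get? r).elim [] (fun v => [pvFmt r v]))) := by
  induction l generalizing init with
  | nil => simp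
  | cons r t ih =>
    rw [List.foldl_cons, List.flatMap_cons]
    cases h : d.get? r <;> simp [ih, List.append_assoc]

-- B's bucket for the rank of a listed resource is A's binding chunk for that resource
theorem pv_chunk (rc : List (String × Int)) (hnd : (rc.map Prod.fst).Nodup)
    (c : Int) (k : String) (hk : ∀ name, pvRank name = c ↔ name = k) :
    (rc.filter (fun p => pvRank p.1 == c)).map (fun p => pvFmt p.1 p.2)
      = ((PySem.Dict.mk rc).get? k).elim [] (fun v => [pvFmt k v]) := by
  have : rc.filter (fun p => pvRank p.1 == c) = rc.filter (fun p => p.1 == k) := by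
    apply List.filter_congr
    intro p _
    simp [hk p.1]
  rw [this, pv_filter_key rc hnd k]
  cases (PySem.Dict.mk rc).get? k <;> simp

-- B's last bucket (rank 12) is A's second loop: the entries not in the display order
theorem pv_chunk12 (rc : List (String × Int)) :
    (rc.filter (fun p => pvRank p.1 == (12:Int))).map (fun p => pvFmt p.1 p.2)
      = (rc.filter (fun p => !pvOrder.contains p.1)).map (fun p => pvFmt p.1 p.2) := by
  congr 1
  apply List.filter_congr
  intro p _
  by_cases h : p.1 ∈ pvOrder
  · simp [h, (by simpa [pvRank_eq_twelve] using h : ¬ pvRank p.1 = 12)]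
  · simp [h, (pvRank_eq_twelve p.1).mpr h]

theorem pv_main (rc : List (String × Int)) (sep : String) (hnd : (rc.map Prod.fst).Nodup) :
    format_cost rc sep = format_cost_alt rc sep := by
  unfold format_cost format_cost_alt
  by_cases hrc : rc = []
  · simp [hrc]
  · rw [if_neg hrc, if_neg hrc]
    refine congrArg (PySem.Str.join sep) ?_
    show (PySem.Dict.mk rc).items.foldl _ (pvOrder.foldl _ []) = _
    have hitems : (PySem.Dict.mk rc).items = rc := rfl
    rw [hitems, pv_foldl_opt,
      PySem.List.foldl_append_if (fun p : String × Int => !pvOrder.contains p.1) (fun p => pvFmt p.1 p.2)]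
    show _ = (PySem.List.pyRange 0 ((pvOrder.length : Int) + 1) 1).foldl _ []
    rw [show PySem.List.pyRange 0 ((pvOrder.length : Int) + 1) 1
          = [0,1,2,3,4,5,6,7,8,9,10,11,12] from by decide]
    rw [PySem.List.foldl_append_eq_flatMap]
    have hbucket : ∀ c : Int,
        (rc.foldl (fun (b : PySem.Dict Int (List String)) p =>
           b.modify (pvRankDict.getD p.1 (pvOrder.length : Int)) [] (· ++ [pvFmt p.1 p.2]))
         PySem.Dict.empty).getD c []
        = (rc.filter (fun p => pvRank p.1 == c)).map (fun p => pvFmt p.1 p.2) := by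
      intro c
      have hl : (rc.foldl (fun (b : PySem.Dict Int (List String)) p =>
           b.modify (pvRankDict.getD p.1 (pvOrder.length : Int)) [] (· ++ [pvFmt p.1 p.2]))
         PySem.Dict.empty)
          = (rc.map (fun p => (pvRank p.1, pvFmt p.1 p.2))).foldl
              (fun b q => b.modify q.1 [] (· ++ [q.2])) PySem.Dict.empty := by
        rw [List.foldl_map]
        simp only [show ((pvOrder.length : Nat) : Int) = 12 from by norm_num [pvOrder],
          pvRankDict_getD]
      rw [hl, PySem.Dict.getD_foldl_modify_append]
      simp [List.filter_map, Function.comp_def]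
    simp only [hbucket]
    rw [List.flatMap_cons, List.flatMap_cons, List.flatMap_cons, List.flatMap_cons,
        List.flatMap_cons, List.flatMap_cons, List.flatMap_cons, List.flatMap_cons,
        List.flatMap_cons, List.flatMap_cons, List.flatMap_cons, List.flatMap_cons,
        List.flatMap_cons, List.flatMap_nil]
    rw [pv_chunk rc hnd 0 "Monster Coins" (fun name => by simpa using pvRank_eq_iff 0 (by norm_num) name),
        pv_chunk rc hnd 1 "Stone" (fun name => by simpa using pvRank_eq_iff 1 (by norm_num) name),
        pv_chunk rc hnd 2 "Iron" (fun name => by simpa using pvRank_eq_iff 2 (by norm_num) name),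
        pv_chunk rc hnd 3 "Copper" (fun name => by simpa using pvRank_eq_iff 3 (by norm_num) name),
        pv_chunk rc hnd 4 "Thorium" (fun name => by simpa using pvRank_eq_iff 4 (by norm_num) name),
        pv_chunk rc hnd 5 "Force Core" (fun name => by simpa using pvRank_eq_iff 5 (by norm_num) name),
        pv_chunk rc hnd 6 "Spirit Core" (fun name => by simpa using pvRank_eq_iff 6 (by norm_num) name),
        pv_chunk rc hnd 7 "Magic Core" (fun name => by simpa using pvRank_eq_iff 7 (by norm_num) name),
        pv_chunk rc hnd 8 "Void Core" (fun name => by simpa using pvRank_eq_iff 8 (by norm_num) name),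
        pv_chunk rc hnd 9 "Unstoppable Force" (fun name => by simpa using pvRank_eq_iff 9 (by norm_num) name),
        pv_chunk rc hnd 10 "Serene Spirit" (fun name => by simpa using pvRank_eq_iff 10 (by norm_num) name),
        pv_chunk rc hnd 11 "Multitudation Vortex" (fun name => by simpa using pvRank_eq_iff 11 (by norm_num) name),
        pv_chunk12 rc]
    simp [pvOrder, List.append_assoc]

-- ===== VERDICT (by name: the statement is the Claim_ definition above) =====
theorem format_cost_spec : Claim_equal_format_cost := by
  intro rc sep _hdom hpre
  show format_cost rc sep = format_cost_alt rc sep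
  exact pv_main rc sep hpre
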